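-- pv_equiv track=rewrite | github.com/JefGrailet/treenet | v2/Measurements/Python/Simplify.py | formatSubnets
-- ===== SOURCE A (Python) =====
-- def formatSubnets(subnetsAsLines):
--     """
--     Formats a subnet dump (provided as list of lines) into a list of strings
--     displaying subnet prefix/prefix length and their respective classification
--     by TreeNET (ACCURATE, ODD, SHADOW).
--
--     Parameters
--     ----------
--     subnetsAsLines : list, n_lines
--         The subnet dump as a list of lines.
--
--     Returns
--     -------
--     formatted : list of formatted subnets
--         The formatted subnets (as described above)
--
--     """
--
--     formatted = []
--     currentSubnet = ''
--     inSubnetCounter = 0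
--     for i in range(0, len(subnetsAsLines)):
--         if not subnetsAsLines[i]:
--             formatted.append(currentSubnet)
--             currentSubnet = ''
--             inSubnetCounter = 0
--         else:
--             inSubnetCounter += 1
--             # Dealing with prefix/prefix length
--             if inSubnetCounter == 1:
--                 currentSubnet = subnetsAsLines[i]
--             # Status
--             elif inSubnetCounter == 2:
--                 currentSubnet += ' ' + subnetsAsLines[i]
--
--     return formatted
-- ===== SOURCE B (Python) =====
-- def formatSubnets(subnetsAsLines):
--     try:
--         b = subnetsAsLines.index('')
--     except ValueError:
--         return []
--     group = subnetsAsLines[:b]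
--     if not group:
--         head = ''
--     elif len(group) == 1:
--         head = group[0]
--     else:
--         head = group[0] + ' ' + group[1]
--     return [head] + formatSubnets(subnetsAsLines[b + 1:])
-- ===== Notes on version B (the rewrite author's own statement) =====
-- stated objective: alternative
-- what changed: A's single-pass state machine (currentSubnet string + inSubnetCounter) is replaced by recursion on the first blank line: index('') finds the next blank, the slice before it is formatted from its first one or two elements, and the function recurses on the remainder, naturally dropping the trailing unterminated group.
import Mathlib
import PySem

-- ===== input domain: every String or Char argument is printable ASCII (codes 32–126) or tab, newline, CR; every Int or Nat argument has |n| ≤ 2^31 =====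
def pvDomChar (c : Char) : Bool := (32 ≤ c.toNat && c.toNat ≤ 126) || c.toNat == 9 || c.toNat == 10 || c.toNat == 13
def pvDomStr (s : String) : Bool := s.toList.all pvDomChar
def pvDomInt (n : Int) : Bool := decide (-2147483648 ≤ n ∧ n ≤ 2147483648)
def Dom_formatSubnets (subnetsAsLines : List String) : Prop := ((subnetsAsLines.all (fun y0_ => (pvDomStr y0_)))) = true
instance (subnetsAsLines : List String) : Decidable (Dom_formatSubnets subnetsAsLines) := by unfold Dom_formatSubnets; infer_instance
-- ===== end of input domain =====

-- B replaces A's one-pass counter state machine by recursion on the first blank line: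
-- find index of '', format the slice before it, recurse on the rest (objective: alternative).

-- ===== PORT A =====
-- the body of A's loop: state (formatted, currentSubnet, inSubnetCounter), current line
def stepA (st : List String × String × Int) (line : String) : List String × String × Int :=
  if line = "" then (st.1 ++ [st.2.1], "", 0)
  else
    let cnt := st.2.2 + 1
    if cnt = 1 then (st.1, line, cnt)
    else if cnt = 2 then (st.1, st.2.1 ++ (" " ++ line), cnt)
    else (st.1, st.2.1, cnt)

def formatSubnets (subnetsAsLines : List String) : List String :=
  ((PySem.List.pyRange 0 (PySem.List.len subnetsAsLines)).foldl
    (fun st i => stepA st (PySem.List.pyGetD subnetsAsLines i ""))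
    ([], "", 0)).1

-- ===== PORT B =====
-- head = '' / group[0] / group[0] + ' ' + group[1]
def fmtGroup (group : List String) : String :=
  if group.isEmpty then ""
  else if group.length = 1 then PySem.List.pyGetD group 0 ""
  else PySem.List.pyGetD group 0 "" ++ " " ++ PySem.List.pyGetD group 1 ""

def formatSubnets_alt (subnetsAsLines : List String) : List String :=
  match h : PySem.List.index? subnetsAsLines "" with
  | none => []
  | some b =>
      fmtGroup (PySem.List.slice subnetsAsLines none (some (b : Int))) ::
        formatSubnets_alt (PySem.List.slice subnetsAsLines (some ((b : Int) + 1)) none)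
termination_by subnetsAsLines.length
decreasing_by
  obtain ⟨hb, -, -⟩ := PySem.List.getElem_of_index?_eq_some h
  have h1 : ((b : Int) + 1) = ((b + 1 : Nat) : Int) := by push_cast; ring
  rw [h1, PySem.List.slice_from_natCast]
  simp only [List.length_drop]
  omega

-- ===== PRECONDITION & SPEC =====
def Spec_formatSubnets (subnetsAsLines : List String) (out : List String) : Prop := out = formatSubnets_alt subnetsAsLines
instance (subnetsAsLines : List String) (out : List String) : Decidable (Spec_formatSubnets subnetsAsLines out) := by unfold Spec_formatSubnets; infer_instance

-- ===== CLAIM (what is proved, stated in full; the proofs are below) =====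
def Claim_equal_formatSubnets : Prop := ∀ (subnetsAsLines : List String), Dom_formatSubnets subnetsAsLines → Spec_formatSubnets subnetsAsLines (formatSubnets subnetsAsLines)

-- ===== LEMMAS AND PROOFS =====

-- reference spec: the lines emitted by A's machine, given current string and counter
def specF : List String → String → Int → List String
  | [], _, _ => []
  | x :: t, cur, cnt =>
    if x = "" then cur :: specF t "" 0
    else if cnt + 1 = 1 then specF t x (cnt + 1)
    else if cnt + 1 = 2 then specF t (cur ++ (" " ++ x)) (cnt + 1)
    else specF t cur (cnt + 1)

-- the current string after processing a blank-free group
def runC : List String → String → Int → String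
  | [], cur, _ => cur
  | x :: t, cur, cnt =>
    if cnt + 1 = 1 then runC t x (cnt + 1)
    else if cnt + 1 = 2 then runC t (cur ++ (" " ++ x)) (cnt + 1)
    else runC t cur (cnt + 1)

theorem foldA (xs : List String) : ∀ (acc : List String) (cur : String) (cnt : Int),
    (xs.foldl stepA (acc, cur, cnt)).1 = acc ++ specF xs cur cnt := by
  induction xs with
  | nil => intro acc cur cnt; simp [specF]
  | cons x t ih =>
    intro acc cur cnt
    rw [List.foldl_cons]
    by_cases h1 : x = ""
    · rw [show stepA (acc, cur, cnt) x = (acc ++ [cur], "", 0) from by simp [stepA, h1], ih]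
      simp [specF, h1]
    · by_cases h2 : cnt + 1 = 1
      · rw [show stepA (acc, cur, cnt) x = (acc, x, cnt + 1) from by simp [stepA, h1, h2], ih]
        simp [specF, h1, h2]
      · by_cases h3 : cnt + 1 = 2
        · rw [show stepA (acc, cur, cnt) x = (acc, cur ++ (" " ++ x), cnt + 1) from by
            simp [stepA, h1, h3], ih]
          simp [specF, h1, h3]
        · rw [show stepA (acc, cur, cnt) x = (acc, cur, cnt + 1) from by
            simp [stepA, h1, h2, h3], ih]
          simp [specF, h1, h2, h3]

theorem formatSubnets_eq_specF (xs : List String) : formatSubnets xs = specF xs "" 0 := by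
  unfold formatSubnets
  rw [PySem.List.foldl_pyRange_pyGetD xs "" stepA ([], "", 0) (le_refl 0)]
  simpa using foldA xs [] "" 0

theorem specF_no_blank (xs : List String) (hx : "" ∉ xs) :
    ∀ (cur : String) (cnt : Int), specF xs cur cnt = [] := by
  induction xs with
  | nil => intro cur cnt; simp [specF]
  | cons x t ih =>
    intro cur cnt
    have hx1 : x ≠ "" := by intro h; exact hx (by simp [h])
    have ht : "" ∉ t := fun h => hx (List.mem_cons_of_mem _ h)
    simp only [specF, if_neg hx1]
    split_ifs <;> exact ih ht _ _

theorem specF_append_blank (g : List String) (hg : "" ∉ g) :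
    ∀ (rest : List String) (cur : String) (cnt : Int),
    specF (g ++ "" :: rest) cur cnt = runC g cur cnt :: specF rest "" 0 := by
  induction g with
  | nil => intro rest cur cnt; simp [specF, runC]
  | cons x t ih =>
    intro rest cur cnt
    have hx1 : x ≠ "" := by intro h; exact hg (by simp [h])
    have ht : "" ∉ t := fun h => hg (List.mem_cons_of_mem _ h)
    simp only [List.cons_append, specF, runC, if_neg hx1]
    split_ifs <;> exact ih ht _ _ _

theorem runC_ge2 (t : List String) : ∀ (cur : String) (cnt : Int), 2 ≤ cnt →
    runC t cur cnt = cur := by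
  induction t with
  | nil => intro cur cnt _; simp [runC]
  | cons x s ih =>
    intro cur cnt h
    have h1 : ¬ (cnt + 1 = 1) := by omega
    have h2 : ¬ (cnt + 1 = 2) := by omega
    simp only [runC, if_neg h1, if_neg h2]
    exact ih cur (cnt + 1) (by omega)

theorem runC_eq_fmtGroup (g : List String) : runC g "" 0 = fmtGroup g := by
  match g with
  | [] => simp [runC, fmtGroup]
  | [a] => simp [runC, fmtGroup, PySem.List.pyGetD]
  | a :: b :: t =>
    show runC (b :: t) a 1 = _
    show runC t (a ++ (" " ++ b)) 2 = _
    rw [runC_ge2 t _ 2 (by omega)]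
    have hassoc : a ++ (" " ++ b) = (a ++ " ") ++ b := by
      apply String.ext; simp
    simp [fmtGroup, PySem.List.pyGetD, hassoc]

theorem alt_eq_specF : ∀ (n : Nat) (xs : List String), xs.length ≤ n →
    formatSubnets_alt xs = specF xs "" 0 := by
  intro n
  induction n with
  | zero =>
    intro xs hlen
    have hxs : xs = [] := List.eq_nil_of_length_eq_zero (Nat.le_zero.mp hlen)
    subst hxs
    rw [formatSubnets_alt]
    simp [specF]
  | succ n ih =>
    intro xs hlen
    rw [formatSubnets_alt]
    split
    · next h =>
      have hmem : "" ∉ xs := (PySem.List.index?_eq_none_iff xs "").mp h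
      rw [specF_no_blank xs hmem]
    · next b h =>
      obtain ⟨pre, suf, hsplit, hprelen, hpre⟩ := (PySem.List.index?_eq_some_iff xs "" b).mp h
      subst hsplit
      have hslice1 : PySem.List.slice (pre ++ "" :: suf) none (some (b : Int)) = pre := by
        rw [PySem.List.slice_to_natCast, ← hprelen]
        simp
      have hslice2 : PySem.List.slice (pre ++ "" :: suf) (some ((b : Int) + 1)) none = suf := by
        have h1 : ((b : Int) + 1) = ((b + 1 : Nat) : Int) := by push_cast; ring
        rw [h1, PySem.List.slice_from_natCast, ← hprelen]
        simp
      rw [hslice1, hslice2]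
      rw [specF_append_blank pre hpre suf "" 0, runC_eq_fmtGroup]
      congr 1
      apply ih
      have hl : (pre ++ "" :: suf).length = pre.length + 1 + suf.length := by
        simp; omega
      omega

-- ===== VERDICT (by name: the statement is the Claim_ definition above) =====
theorem formatSubnets_spec : Claim_equal_formatSubnets := by
  intro xs _
  unfold Spec_formatSubnets
  rw [formatSubnets_eq_specF, alt_eq_specF xs.length xs (le_refl _)]
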